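-- pv_equiv track=rewrite | github.com/Lalan12309/Python- | points.py | calculateMaximumPointsEarned
-- ===== SOURCE A (Python) =====
-- def calculateMaximumPointsEarned(pointValues):
--     pointValues.sort(reverse=True)
--     total = 0
--     for i, v in enumerate(pointValues):
--         if v <= i:
--             break
--         total += v - i
--     return total
-- ===== SOURCE B (Python) =====
-- def calculateMaximumPointsEarned(pointValues):
--     pointValues.sort(reverse=True)
--     # On the descending-sorted list, v - i is strictly decreasing, so the
--     # predicate pointValues[i] <= i is monotone: binary-search the first
--     # index where it holds instead of scanning.
--     lo, hi = 0, len(pointValues)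
--     while lo < hi:
--         mid = (lo + hi) // 2
--         if pointValues[mid] <= mid:
--             hi = mid
--         else:
--             lo = mid + 1
--     return sum(pointValues[:lo]) - lo * (lo - 1) // 2
-- ===== Notes on version B (the rewrite author's own statement) =====
-- stated objective: alternative
-- what changed: A accumulates v - i in a linear loop that breaks at the first index with v <= i; B instead binary-searches that cutoff index k (the predicate pointValues[i] <= i is monotone on the descending-sorted list) and returns sum(pointValues[:k]) - k*(k-1)//2 via the triangular-number closed form.
import Mathlib
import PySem

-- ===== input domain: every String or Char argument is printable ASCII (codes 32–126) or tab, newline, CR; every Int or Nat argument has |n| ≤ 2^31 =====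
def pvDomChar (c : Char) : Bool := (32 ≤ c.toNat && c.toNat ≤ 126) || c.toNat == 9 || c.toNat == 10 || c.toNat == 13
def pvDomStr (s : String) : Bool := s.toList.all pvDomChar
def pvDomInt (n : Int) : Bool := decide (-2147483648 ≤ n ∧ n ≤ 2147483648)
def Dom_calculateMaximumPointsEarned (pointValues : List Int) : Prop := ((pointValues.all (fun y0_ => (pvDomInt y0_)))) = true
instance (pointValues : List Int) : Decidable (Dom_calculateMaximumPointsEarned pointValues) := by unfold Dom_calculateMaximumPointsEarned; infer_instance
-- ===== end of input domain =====

-- B replaces A's linear accumulate-until-break by a binary search for the cutoff index k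
-- plus the closed form sum(prefix k) - k*(k-1)//2 (objective: alternative).
-- Both sort the argument in place; the equivalence proved here is about the return value.

-- ===== PORT A =====
-- A's loop over enumerate(sorted list): i is the index, total the accumulator; break = return total.
def pvALoop (i : Int) (total : Int) : List Int → Int
  | [] => total
  | v :: rest => if v ≤ i then total else pvALoop (i + 1) (total + (v - i)) rest

def calculateMaximumPointsEarned (pointValues : List Int) : Int :=
  pvALoop 0 0 (PySem.List.sorted pointValues (fun x => x) true)

-- ===== PORT B =====
-- B's while-loop binary search: lo, hi : Nat (both stay in [0, len]); whenever pointValues[mid]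
-- is read, lo ≤ mid < hi ≤ len, so the index is in range and getD is exact; (lo+hi)//2 on
-- nonnegative ints is Nat division.
def pvBSearch (s : List Int) (lo hi : Nat) : Nat :=
  if h : lo < hi then
    let mid := (lo + hi) / 2
    if s.getD mid 0 ≤ (mid : Int) then pvBSearch s lo mid else pvBSearch s (mid + 1) hi
  else lo
termination_by hi - lo
decreasing_by
  · omega
  · omega

def calculateMaximumPointsEarned_alt (pointValues : List Int) : Int :=
  let s := PySem.List.sorted pointValues (fun x => x) true
  let k := pvBSearch s 0 s.length
  (PySem.List.slice s none (some (k : Int))).sum - PySem.Int.floordiv ((k : Int) * ((k : Int) - 1)) 2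

-- ===== PRECONDITION & SPEC =====
def Spec_calculateMaximumPointsEarned (pointValues : List Int) (out : Int) : Prop := out = calculateMaximumPointsEarned_alt pointValues
instance (pointValues : List Int) (out : Int) : Decidable (Spec_calculateMaximumPointsEarned pointValues out) := by unfold Spec_calculateMaximumPointsEarned; infer_instance

-- ===== CLAIM (what is proved, stated in full; the proofs are below) =====
def Claim_equal_calculateMaximumPointsEarned : Prop := ∀ (pointValues : List Int), Dom_calculateMaximumPointsEarned pointValues → Spec_calculateMaximumPointsEarned pointValues (calculateMaximumPointsEarned pointValues)

-- ===== LEMMAS AND PROOFS =====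

-- Number of iterations of A's loop when starting at index i (proof-side helper).
def pvSteps (i : Int) : List Int → Nat
  | [] => 0
  | v :: rest => if v ≤ i then 0 else pvSteps (i + 1) rest + 1

-- Closed form of A's loop: sum of the first (pvSteps) elements minus the arithmetic progression.
theorem pvALoop_closed (s : List Int) : ∀ (i t : Int),
    pvALoop i t s =
      t + (s.take (pvSteps i s)).sum
        - ((pvSteps i s : Int) * i + ((pvSteps i s * (pvSteps i s - 1)) / 2 : Nat)) := by
  induction s with
  | nil => intro i t; simp [pvALoop, pvSteps]
  | cons v rest ih =>
    intro i t
    by_cases h : v ≤ i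
    · simp [pvALoop, pvSteps, h]
    · simp only [pvALoop, pvSteps, if_neg h, ih (i + 1)]
      have hm : (pvSteps (i + 1) rest + 1) * (pvSteps (i + 1) rest + 1 - 1) / 2
          = pvSteps (i + 1) rest * (pvSteps (i + 1) rest - 1) / 2 + pvSteps (i + 1) rest := by
        generalize pvSteps (i + 1) rest = n
        have h1 : (n + 1) * (n + 1 - 1) = n * (n - 1) + 2 * n := by
          cases n with
          | zero => rfl
          | succ m => simp only [Nat.add_sub_cancel]; ring
        have h2 : Even (n * (n - 1)) := by
          rcases Nat.even_or_odd n with h | h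
          · exact h.mul_right _
          · exact (Nat.Odd.sub_odd h odd_one).mul_left _
        obtain ⟨c, hc⟩ := h2
        omega
      simp only [List.take_succ_cons, List.sum_cons, hm]
      push_cast; ring

theorem pvSteps_le_length (s : List Int) : ∀ i : Int, pvSteps i s ≤ s.length := by
  induction s with
  | nil => intro i; simp [pvSteps]
  | cons v rest ih =>
    intro i
    by_cases h : v ≤ i <;> simp [pvSteps, h]; exact ih (i + 1)

-- At the cutoff the break condition holds (getD 0 beyond the list: 0 ≤ i + m for Nat i).
theorem pvSteps_hit (s : List Int) : ∀ i : Nat,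
    s.getD (pvSteps (i : Int) s) 0 ≤ (i : Int) + (pvSteps (i : Int) s : Int) := by
  induction s with
  | nil => intro i; simp [pvSteps]
  | cons v rest ih =>
    intro i
    by_cases h : v ≤ (i : Int)
    · simp [pvSteps, h]
    · have := ih (i + 1)
      simp only [pvSteps, if_neg h, List.getD_cons_succ]
      push_cast at this ⊢
      linarith

-- Strictly before the cutoff the break condition fails.
theorem pvSteps_miss (s : List Int) : ∀ (i j : Nat), j < pvSteps (i : Int) s →
    (i : Int) + (j : Int) < s.getD j 0 := by
  induction s with
  | nil => intro i j hj; simp [pvSteps] at hj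
  | cons v rest ih =>
    intro i j hj
    by_cases h : v ≤ (i : Int)
    · simp [pvSteps, h] at hj
    · cases j with
      | zero => simpa using not_le.mp h
      | succ m =>
        simp only [pvSteps, if_neg h] at hj
        have hcast : ((i + 1 : Nat) : Int) = (i : Int) + 1 := by push_cast; ring
        have := ih (i + 1) m (by rw [hcast]; omega)
        rw [hcast] at this
        simp only [List.getD_cons_succ]
        push_cast at this ⊢
        linarith

-- On a descending-sorted list the predicate getD j 0 ≤ j is equivalent to "past the cutoff".
theorem pvCutoff_iff (s : List Int) (hs : s.Pairwise (fun a b => b ≤ a)) (j : Nat) :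
    (s.getD j 0 ≤ (j : Int)) ↔ pvSteps 0 s ≤ j := by
  constructor
  · intro h
    by_contra hlt
    have hm := pvSteps_miss s 0 j (by simp only [Nat.cast_zero]; omega)
    simp only [Nat.cast_zero, zero_add] at hm
    omega
  · intro h
    have hhit := pvSteps_hit s 0
    simp only [Nat.cast_zero, zero_add] at hhit
    -- monotone step: push the property from the cutoff up to j
    have mono : ∀ m : Nat, s.getD m 0 ≤ (m : Int) → s.getD (m + 1) 0 ≤ ((m + 1 : Nat) : Int) := by
      intro m hm
      by_cases hlen : m + 1 < s.length
      · have hadj : s.getD (m + 1) 0 ≤ s.getD m 0 := by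
          have := (List.pairwise_iff_getElem.mp hs) m (m + 1) (by omega) hlen (by omega)
          simpa [List.getD_eq_getElem?_getD, List.getElem?_eq_getElem, hlen,
            (by omega : m < s.length)] using this
        push_cast; linarith
      · have : s.getD (m + 1) 0 = 0 := by
          rw [List.getD_eq_getElem?_getD, List.getElem?_eq_none (by omega)]; rfl
        rw [this]; positivity
    have : ∀ d : Nat, s.getD (pvSteps 0 s + d) 0 ≤ ((pvSteps 0 s + d : Nat) : Int) := by
      intro d
      induction d with
      | zero => simpa using hhit
      | succ e ihe => simpa [← Nat.add_assoc] using mono (pvSteps 0 s + e) ihe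
    have := this (j - pvSteps 0 s)
    rwa [Nat.add_sub_cancel' h] at this

-- Binary search converges to the cutoff when bracketed by it.
theorem pvBSearch_eq (s : List Int) (F : Nat)
    (hQ : ∀ j : Nat, (s.getD j 0 ≤ (j : Int)) ↔ F ≤ j) :
    ∀ n lo hi, hi - lo ≤ n → lo ≤ F → F ≤ hi → pvBSearch s lo hi = F := by
  intro n
  induction n with
  | zero =>
    intro lo hi hn hlo hhi
    have : ¬ lo < hi := by omega
    rw [pvBSearch, dif_neg this]; omega
  | succ m ih =>
    intro lo hi hn hlo hhi
    by_cases h : lo < hi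
    · rw [pvBSearch, dif_pos h]
      set mid := (lo + hi) / 2 with hmid
      by_cases hq : s.getD mid 0 ≤ (mid : Int)
      · rw [if_pos hq]
        exact ih lo mid (by omega) hlo ((hQ mid).mp hq)
      · rw [if_neg hq]
        have : ¬ F ≤ mid := fun hF => hq ((hQ mid).mpr hF)
        exact ih (mid + 1) hi (by omega) (by omega) hhi
    · rw [pvBSearch, dif_neg h]; omega

-- ===== VERDICT (by name: the statement is the Claim_ definition above) =====
theorem calculateMaximumPointsEarned_spec : Claim_equal_calculateMaximumPointsEarned := by
  intro pointValues _
  unfold Spec_calculateMaximumPointsEarned calculateMaximumPointsEarned calculateMaximumPointsEarned_alt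
  set s := PySem.List.sorted pointValues (fun x => x) true with hsdef
  have hs : s.Pairwise (fun a b => b ≤ a) := PySem.List.sorted_pairwise_rev pointValues (fun x => x)
  set F := pvSteps 0 s with hF
  have hk : pvBSearch s 0 s.length = F :=
    pvBSearch_eq s F (pvCutoff_iff s hs) s.length 0 s.length (by omega) (by omega)
      (pvSteps_le_length s 0)
  simp only [hk]
  have hslice : PySem.List.slice s none (some (F : Int)) = s.take F :=
    PySem.List.slice_to_natCast s F
  have hdiv : PySem.Int.floordiv ((F : Int) * ((F : Int) - 1)) 2
      = ((F * (F - 1) / 2 : Nat) : Int) := by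
    cases F with
    | zero => simp [PySem.Int.floordiv]
    | succ n =>
      have h1 : ((n + 1 : Nat) : Int) * (((n + 1 : Nat) : Int) - 1) = (((n + 1) * n : Nat) : Int) := by
        push_cast; ring
      have h2 : (n + 1) * (n + 1 - 1) = (n + 1) * n := by simp
      rw [h1, h2]
      exact_mod_cast PySem.Int.floordiv_natCast ((n + 1) * n) 2
  rw [hslice, hdiv, pvALoop_closed s 0 0]
  push_cast; ring
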